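-- pv_equiv track=rewrite | github.com/lidl2019/braille-converter | to_unicode.py | is_ostring
-- ===== SOURCE A (Python) =====
-- def is_ostring(s):
--     '''(str) -> bool
--     Is s formatted like an o-string? It can be 6-dot or 8-dot.
--     TODO: For students to complete.
--     >>> is_ostring('o.\\noo\\n..')
--     True
--     >>> is_ostring('o.\\noo\\n..\\noo')
--     True
--     >>> is_ostring('o.\\n00\\n..\\noo')
--     False
--     >>> is_ostring('o.\\noo')
--     False
--     >>> is_ostring('o.o\\no\\n..')
--     False
--     >>> is_ostring('o.\\noo\\n..\\noo\\noo')
--     False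
--     >>> is_ostring('\\n')
--     False
--     >>> is_ostring('A')
--     False
--     '''
--
--     #check if there are always two dots in between
--     if len(s) != 8 and len(s) != 11:
--             return False
--
--
--     dot_left = 2
--     # use numbers to represent '.' and 'o' in a string
--     for i in s:
--     # from left.s to right.s
--         if i != 'o' and i != '.' and i != '\n':
--             return False
--     # the term \n should be considered separately because it may appear at an unusual place
--         elif i == '\n':
--             dot_left = 2
--     # everytime back to \n, there are 2 dots waiting for evaluation
--     # if i is not \n, then go to else
--         else:
--             dot_left -= 1
--     # when there are more than 2 dots in a role
--     # dot_left will be < 0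
--     # once dot_left < 0, the program evaluate to False
--             if dot_left < 0:
--                 return False
--     #if if pass the test then return True
--
--
--     return True
-- ===== SOURCE B (Python) =====
-- def is_ostring(s):
--     '''(str) -> bool  Is s formatted like an o-string? It can be 6-dot or 8-dot.'''
--     return (len(s) in (8, 11)
--             and all(c in 'o.\n' for c in s)
--             and all(len(part) <= 2 for part in s.split('\n')))
-- ===== Notes on version B (the rewrite author's own statement) =====
-- stated objective: simpler
-- what changed: Replaces A's early-return loop with a running dot_left counter by three declarative checks: length in {8,11}, all chars in 'o.\n', and every '\n'-separated segment of length <= 2.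
import Mathlib
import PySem

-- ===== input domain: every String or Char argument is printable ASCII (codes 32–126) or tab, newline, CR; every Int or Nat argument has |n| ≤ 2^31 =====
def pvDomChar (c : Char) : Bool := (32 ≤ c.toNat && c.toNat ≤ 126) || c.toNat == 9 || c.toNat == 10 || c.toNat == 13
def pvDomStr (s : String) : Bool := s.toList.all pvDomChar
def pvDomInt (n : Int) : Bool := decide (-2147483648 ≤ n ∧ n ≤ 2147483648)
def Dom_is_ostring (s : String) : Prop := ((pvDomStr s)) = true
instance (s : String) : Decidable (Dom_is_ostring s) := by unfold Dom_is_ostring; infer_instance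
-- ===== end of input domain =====

-- B replaces A's running dot_left counter/early-return loop by three declarative checks
-- (length in {8,11}, all chars valid, every '\n'-split segment has length ≤ 2); objective: simpler.


-- ===== PORT A =====
-- the for-loop over s with the running dot_left counter, early returns as early `false`
def is_ostring_loop : List Char → Int → Bool
  | [], _ => true
  | c :: rest, dot_left =>
    if !(c == 'o') && !(c == '.') && !(c == '\n') then false
    else if c == '\n' then is_ostring_loop rest 2
    else
      if dot_left - 1 < 0 then false
      else is_ostring_loop rest (dot_left - 1)

def is_ostring (s : String) : Bool :=
  if !(s.toList.length == 8) && !(s.toList.length == 11) then false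
  else is_ostring_loop s.toList 2

-- ===== PORT B =====
def is_ostring_alt (s : String) : Bool :=
  (s.toList.length == 8 || s.toList.length == 11)
    && s.toList.all (fun c => ['o', '.', '\n'].contains c)
    && (PySem.Chars.splitOn s.toList ['\n']).all (fun part => part.length ≤ 2)

-- ===== PRECONDITION & SPEC =====
def Spec_is_ostring (s : String) (out : Bool) : Prop := out = is_ostring_alt s
instance (s : String) (out : Bool) : Decidable (Spec_is_ostring s out) := by unfold Spec_is_ostring; infer_instance

-- ===== CLAIM (what is proved, stated in full; the proofs are below) =====
def Claim_equal_is_ostring : Prop := ∀ (s : String), Dom_is_ostring s → Spec_is_ostring s (is_ostring s)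

-- ===== LEMMAS AND PROOFS =====

-- simple structural version of splitting on '\n' (proof device)
def splitNl : List Char → List (List Char)
  | [] => [[]]
  | c :: t => if c = '\n' then [] :: splitNl t else (splitNl t).modifyHead (c :: ·)

theorem splitNl_ne_nil (l : List Char) : splitNl l ≠ [] := by
  cases l with
  | nil => simp [splitNl]
  | cons c t =>
    simp only [splitNl]
    split
    · simp
    · cases h : splitNl t with
      | nil => exact absurd h (splitNl_ne_nil t)
      | cons x xs => simp [List.modifyHead]

theorem splitOn_go_spec (fuel : Nat) (l cur : List Char) (acc : List (List Char))
    (h : l.length ≤ fuel) :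
    PySem.Chars.splitOn.go ['\n'] fuel l cur acc
      = acc.reverse ++ (cur.reverse ++ (splitNl l).headI) :: (splitNl l).tail := by
  induction fuel generalizing l cur acc with
  | zero =>
    have hl : l = [] := List.length_eq_zero_iff.mp (Nat.le_zero.mp h)
    subst hl
    simp [PySem.Chars.splitOn.go, splitNl]
  | succ n ih =>
    cases l with
    | nil => simp [PySem.Chars.splitOn.go, splitNl]
    | cons c rest =>
      simp only [List.length_cons, Nat.add_le_add_iff_right] at h
      by_cases hc : c = '\n'
      · subst hc
        have : PySem.Chars.splitOn.go ['\n'] (n+1) ('\n' :: rest) cur acc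
            = PySem.Chars.splitOn.go ['\n'] n rest [] (cur.reverse :: acc) := by
          simp [PySem.Chars.splitOn.go, List.isPrefixOf]
        rw [this, ih rest [] (cur.reverse :: acc) h]
        obtain ⟨x, xs, hx⟩ := List.exists_cons_of_ne_nil (splitNl_ne_nil rest)
        simp [splitNl, hx]
      · have : PySem.Chars.splitOn.go ['\n'] (n+1) (c :: rest) cur acc
            = PySem.Chars.splitOn.go ['\n'] n rest (c :: cur) acc := by
          simp only [PySem.Chars.splitOn.go, List.isPrefixOf, Bool.and_true]
          rw [if_neg (by simp [Ne.symm hc])]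
        rw [this, ih rest (c :: cur) acc h]
        obtain ⟨x, xs, hx⟩ := List.exists_cons_of_ne_nil (splitNl_ne_nil rest)
        simp [splitNl, hc, hx, List.modifyHead]

theorem splitOn_eq_splitNl (l : List Char) :
    PySem.Chars.splitOn l ['\n'] = splitNl l := by
  have := splitOn_go_spec (l.length + 1) l [] [] (Nat.le_succ _)
  simp only [PySem.Chars.splitOn] at *
  rw [this]
  obtain ⟨x, xs, hx⟩ := List.exists_cons_of_ne_nil (splitNl_ne_nil l)
  simp [hx]

-- the loop computes: all chars valid, first segment fits in dot_left, later segments fit in 2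
theorem loop_spec (l : List Char) (d : Int) (hd : 0 ≤ d) :
    is_ostring_loop l d
      = (l.all (fun c => ['o', '.', '\n'].contains c)
        && decide (((splitNl l).headI.length : Int) ≤ d)
        && (splitNl l).tail.all (fun part => part.length ≤ 2)) := by
  induction l generalizing d with
  | nil => simp [is_ostring_loop, splitNl]; omega
  | cons c rest ih =>
    by_cases hv : c = 'o' ∨ c = '.' ∨ c = '\n'
    · by_cases hn : c = '\n'
      · subst hn
        have hstep : is_ostring_loop ('\n' :: rest) d = is_ostring_loop rest 2 := by
          simp [is_ostring_loop]
        rw [hstep, ih 2 (by omega)]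
        obtain ⟨x, xs, hx⟩ := List.exists_cons_of_ne_nil (splitNl_ne_nil rest)
        simp [splitNl, hx, hd, Bool.and_assoc]
      · obtain ⟨x, xs, hx⟩ := List.exists_cons_of_ne_nil (splitNl_ne_nil rest)
        have hsp : splitNl (c :: rest) = (c :: x) :: xs := by
          simp [splitNl, hn, hx, List.modifyHead]
        have hc1 : (['o', '.', '\n'].contains c) = true := by
          rcases hv with h | h | h <;> simp [h]
        by_cases hz : d - 1 < 0
        · have hstep : is_ostring_loop (c :: rest) d = false := by
            rcases hv with h | h | h
            · simp [is_ostring_loop, h, hz]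
            · simp [is_ostring_loop, h, hz]
            · exact absurd h hn
          rw [hstep, hsp]
          simp only [List.headI, List.tail]
          simp
          intro _ _ hlt
          exfalso
          omega
        · have hstep : is_ostring_loop (c :: rest) d = is_ostring_loop rest (d - 1) := by
            rcases hv with h | h | h
            · simp [is_ostring_loop, h, hz]
            · simp [is_ostring_loop, h, hz]
            · exact absurd h hn
          rw [hstep, ih (d - 1) (by omega), hsp, hx]
          simp only [List.headI, List.tail, List.all_cons, hc1, Bool.true_and]
          congr 1
          congr 1
          rw [decide_eq_decide]
          simp
    · simp only [not_or] at hv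
      obtain ⟨h1, h2, h3⟩ := hv
      simp [is_ostring_loop, h1, h2, h3]

-- ===== VERDICT (by name: the statement is the Claim_ definition above) =====
theorem is_ostring_spec : Claim_equal_is_ostring := by
  intro s _
  unfold Spec_is_ostring is_ostring is_ostring_alt
  rw [splitOn_eq_splitNl]
  by_cases hlen : s.toList.length = 8 ∨ s.toList.length = 11
  · have hif : (!(s.toList.length == 8) && !(s.toList.length == 11)) = false := by
      rcases hlen with h | h <;> simp [h]
    have hor : (s.toList.length == 8 || s.toList.length == 11) = true := by
      rcases hlen with h | h <;> simp [h]
    rw [hif, hor]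
    simp only [Bool.false_eq_true, if_false, Bool.true_and]
    rw [loop_spec s.toList 2 (by omega)]
    obtain ⟨x, xs, hx⟩ := List.exists_cons_of_ne_nil (splitNl_ne_nil s.toList)
    rw [hx]
    simp only [List.headI, List.tail, List.all_cons, Bool.and_assoc]
    congr 1
    congr 1
    rw [decide_eq_decide]
    omega
  · simp only [not_or] at hlen
    have h1 : (s.toList.length == 8) = false := beq_eq_false_iff_ne.mpr hlen.1
    have h2 : (s.toList.length == 11) = false := beq_eq_false_iff_ne.mpr hlen.2
    rw [h1, h2]
    simp
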